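-- pv_equiv track=rewrite | github.com/ischeinkman/osg-transfer-latency | datagen.py | data_by_dest
-- ===== SOURCE A (Python) =====
-- def data_by_dest(rows, with_direction=True):
--     retval = {}
--     for ent in rows:
--         key = ent['dest']
--         if with_direction:
--             prefix = '-> ' if ent['kind'].lower()[0] == 'u' else '<- '
--             key = prefix + key
--         if not key in retval:
--             retval[key] = []
--         retval[key].append(ent)
--     return retval
-- ===== SOURCE B (Python) =====
-- def data_by_dest(rows, with_direction=True):
--     def key_of(ent):
--         key = ent['dest']
--         if with_direction:
--             key = ('-> ' if ent['kind'].lower()[0] == 'u' else '<- ') + key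
--         return key
--     keys = [key_of(ent) for ent in rows]
--     order = []
--     for k in keys:
--         if k not in order:
--             order.append(k)
--     return {k: [ent for kk, ent in zip(keys, rows) if kk == k] for k in order}
-- ===== Notes on version B (the rewrite author's own statement) =====
-- stated objective: alternative
-- what changed: B replaces A's single-pass dict bucketing (create-bucket-then-append per row) with a two-phase group-by: precompute each row's key, dedup the keys in first-occurrence order, then build each group by filtering the keyed rows per distinct key.
import Mathlib
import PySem

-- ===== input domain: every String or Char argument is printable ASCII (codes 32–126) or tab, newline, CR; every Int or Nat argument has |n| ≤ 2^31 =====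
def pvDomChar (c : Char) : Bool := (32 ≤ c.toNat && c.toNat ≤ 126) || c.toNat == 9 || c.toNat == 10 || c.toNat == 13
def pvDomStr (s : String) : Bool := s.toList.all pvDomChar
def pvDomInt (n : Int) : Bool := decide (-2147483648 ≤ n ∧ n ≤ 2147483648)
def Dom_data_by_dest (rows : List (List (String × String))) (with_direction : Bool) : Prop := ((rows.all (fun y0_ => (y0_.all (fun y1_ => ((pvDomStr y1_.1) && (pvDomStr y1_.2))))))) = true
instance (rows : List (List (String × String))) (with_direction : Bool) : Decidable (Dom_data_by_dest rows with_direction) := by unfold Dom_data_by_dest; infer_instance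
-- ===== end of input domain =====

-- B regroups by key-list + ordered dedup + per-key filter instead of A's single-pass dict bucketing; same result, different decomposition (objective: alternative).

-- ===== PORT A =====
-- key computation of A's loop body: ent['dest'], optionally prefixed by direction;
-- none = the Python raises (KeyError on 'dest'/'kind', IndexError on empty 'kind')
def pvKeyA (ent : List (String × String)) (wd : Bool) : Option String :=
  match (PySem.Dict.mk ent).get? "dest" with
  | none => none
  | some dest =>
    if wd then
      match (PySem.Dict.mk ent).get? "kind" with
      | none => none
      | some kind =>
        match PySem.Str.pyGet? (PySem.Str.lower kind) 0 with
        | none => none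
        | some c => some ((if c == 'u' then "-> " else "<- ") ++ dest)
    else some dest

-- A: one pass, bucket dict; 'if key not in retval: retval[key] = []' then append.
-- State is Option-threaded: none = an exception was raised (excluded by Pre_).
def data_by_dest (rows : List (List (String × String))) (with_direction : Bool) : List (String × List (List (String × String))) :=
  match rows.foldl
      (fun st ent =>
        match st with
        | none => none
        | some retval =>
          match pvKeyA ent with_direction with
          | none => none
          | some key =>
            some ((if retval.contains key then retval else retval.insert key []).modify key []
                    (fun l => l ++ [ent])))
      (some (PySem.Dict.empty)) with
  | some retval => retval.items
  | none => []      -- unreachable under Pre_data_by_dest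

-- ===== PORT B =====
-- B's key_of helper (same rule as A's loop body computes)
def pvKeyB (ent : List (String × String)) (wd : Bool) : Option String :=
  match (PySem.Dict.mk ent).get? "dest" with
  | none => none
  | some dest =>
    if wd then
      match (PySem.Dict.mk ent).get? "kind" with
      | none => none
      | some kind =>
        match PySem.Str.pyGet? (PySem.Str.lower kind) 0 with
        | none => none
        | some c => some ((if c == 'u' then "-> " else "<- ") ++ dest)
    else some dest

-- keys = [key_of(ent) for ent in rows]  (none = some row raised)
def pvKeysB (rows : List (List (String × String))) (wd : Bool) : Option (List String) :=
  match rows with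
  | [] => some []
  | e :: t =>
    match pvKeyB e wd with
    | none => none
    | some k =>
      match pvKeysB t wd with
      | none => none
      | some ks => some (k :: ks)

-- B: dedup keys in first-occurrence order, then one filter pass per distinct key.
def data_by_dest_alt (rows : List (List (String × String))) (with_direction : Bool) : List (String × List (List (String × String))) :=
  match pvKeysB rows with_direction with
  | none => []      -- unreachable under Pre_data_by_dest
  | some keys =>
    let order := keys.foldl (fun acc k => if acc.contains k then acc else acc ++ [k]) []
    order.map (fun k => (k, ((keys.zip rows).filter (fun p => p.1 == k)).map (fun p => p.2)))

-- ===== PRECONDITION & SPEC =====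
-- Pre_ excludes exactly the inputs on which A raises: a row without a 'dest' key, or
-- (when with_direction) without a 'kind' key or with an empty 'kind' value.
def Pre_data_by_dest (rows : List (List (String × String))) (with_direction : Bool) : Prop :=
  ∀ ent ∈ rows,
    ((PySem.Dict.mk ent).get? "dest").isSome = true ∧
    (with_direction = true →
      ((PySem.Dict.mk ent).get? "kind").isSome = true ∧
      (PySem.Dict.mk ent).get? "kind" ≠ some "")
instance (rows : List (List (String × String))) (with_direction : Bool) : Decidable (Pre_data_by_dest rows with_direction) := by unfold Pre_data_by_dest; infer_instance

def pvWitness_data_by_dest : (List (List (String × String))) × Bool :=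
  ([[("dest", "a.example"), ("kind", "Upload")],
    [("dest", "a.example"), ("kind", "download")],
    [("dest", "b.example"), ("kind", "u")]], true)

def Spec_data_by_dest (rows : List (List (String × String))) (with_direction : Bool) (out : List (String × List (List (String × String)))) : Prop := out = data_by_dest_alt rows with_direction
instance (rows : List (List (String × String))) (with_direction : Bool) (out : List (String × List (List (String × String)))) : Decidable (Spec_data_by_dest rows with_direction out) := by unfold Spec_data_by_dest; infer_instance

-- ===== CLAIM (what is proved, stated in full; the proofs are below) =====
def Claim_equal_data_by_dest : Prop := ∀ (rows : List (List (String × String))) (with_direction : Bool), Dom_data_by_dest rows with_direction → Pre_data_by_dest rows with_direction → Spec_data_by_dest rows with_direction (data_by_dest rows with_direction)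

-- ===== LEMMAS AND PROOFS =====

-- the two key helpers are the same function
theorem keyAB : pvKeyB = pvKeyA := rfl

-- total key function used to characterise both ports under Pre_
def pvKf (wd : Bool) (ent : List (String × String)) : String := (pvKeyA ent wd).getD ""

-- Pre_ makes every key defined
theorem key_isSome (ent : List (String × String)) (wd : Bool)
    (h : ((PySem.Dict.mk ent).get? "dest").isSome = true ∧
      (wd = true → ((PySem.Dict.mk ent).get? "kind").isSome = true ∧
        (PySem.Dict.mk ent).get? "kind" ≠ some "")) :
    (pvKeyA ent wd).isSome = true := by
  obtain ⟨hd, hk⟩ := h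
  obtain ⟨dest, hdest⟩ := Option.isSome_iff_exists.mp hd
  cases wd with
  | false => simp [pvKeyA, hdest]
  | true =>
    obtain ⟨hk1, hk2⟩ := hk rfl
    obtain ⟨kind, hkind⟩ := Option.isSome_iff_exists.mp hk1
    have hne : kind ≠ "" := fun h0 => hk2 (by rw [hkind, h0])
    have hlist : kind.toList ≠ [] :=
      fun h0 => hne (by rw [← String.ofList_toList (s := kind), h0])
    obtain ⟨a, t, hl⟩ := List.exists_cons_of_ne_nil hlist
    simp [pvKeyA, hdest, hkind, hl, PySem.Chars.lower]

-- A's Option-threaded fold, under Pre_, is the plain modify-fold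
theorem A_fold_eq (rows : List (List (String × String))) (wd : Bool)
    (h : ∀ ent ∈ rows, (pvKeyA ent wd).isSome = true)
    (d : PySem.Dict String (List (List (String × String)))) :
    rows.foldl
      (fun st ent =>
        match st with
        | none => none
        | some retval =>
          match pvKeyA ent wd with
          | none => none
          | some key =>
            some ((if retval.contains key then retval else retval.insert key []).modify key []
                    (fun l => l ++ [ent])))
      (some d)
    = some (rows.foldl (fun d ent => d.modify (pvKf wd ent) [] (fun l => l ++ [ent])) d) := by
  induction rows generalizing d with
  | nil => rfl
  | cons e t ih =>
    have he : (pvKeyA e wd).isSome = true := h e (by simp)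
    cases hk : pvKeyA e wd with
    | none => simp [hk] at he
    | some k =>
      have hstep : (if d.contains k then d else d.insert k []).modify k [] (fun l => l ++ [e])
          = d.modify k [] (fun l => l ++ [e]) := by
        by_cases hc : d.contains k = true
        · simp [hc]
        · simp only [Bool.not_eq_true] at hc
          have hg : d.getD k [] = [] := PySem.Dict.getD_of_not_contains d [] hc
          simp [hc, PySem.Dict.modify, PySem.Dict.getD_insert_self,
            PySem.Dict.insert_insert_self, hg]
      simp only [List.foldl_cons, hk, hstep]
      rw [ih (fun x hx => h x (by simp [hx]))]
      simp [pvKf, hk]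

-- B's key list, under Pre_, is the map of the total key function
theorem B_keys_eq (rows : List (List (String × String))) (wd : Bool)
    (h : ∀ ent ∈ rows, (pvKeyA ent wd).isSome = true) :
    pvKeysB rows wd = some (rows.map (pvKf wd)) := by
  induction rows with
  | nil => rfl
  | cons e t ih =>
    have he : (pvKeyA e wd).isSome = true := h e (by simp)
    cases hk : pvKeyA e wd with
    | none => simp [hk] at he
    | some k =>
      unfold pvKeysB
      rw [keyAB, hk, ih (fun x hx => h x (by simp [hx]))]
      simp [pvKf, hk]

-- B's dedup loop is PySem.Set.ofList
theorem B_order_eq (keys : List String) :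
    keys.foldl (fun acc k => if acc.contains k then acc else acc ++ [k]) [] = PySem.Set.ofList keys := by
  rw [PySem.Set.ofList_eq_foldl]
  rfl

theorem data_by_dest_spec' (rows : List (List (String × String))) (wd : Bool)
    (hp : Pre_data_by_dest rows wd) :
    data_by_dest rows wd = data_by_dest_alt rows wd := by
  have h : ∀ ent ∈ rows, (pvKeyA ent wd).isSome = true := fun ent hm => key_isSome ent wd (hp ent hm)
  have hfold : rows.foldl (fun d ent => d.modify (pvKf wd ent) [] (fun l => l ++ [ent])) PySem.Dict.empty
      = (rows.map (fun e => (pvKf wd e, e))).foldl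
          (fun d p => d.modify p.1 [] (fun l => l ++ [p.2])) PySem.Dict.empty := by
    rw [List.foldl_map]
  have hnd : (rows.foldl (fun d ent => d.modify (pvKf wd ent) [] (fun l => l ++ [ent])) PySem.Dict.empty).keys.Nodup :=
    PySem.Dict.nodup_keys_foldl_modify_key rows (pvKf wd) [] (fun _ x l => l ++ [x]) _ (by simp)
  have hkeys : (rows.foldl (fun d ent => d.modify (pvKf wd ent) [] (fun l => l ++ [ent])) PySem.Dict.empty).keys
      = PySem.Set.ofList (rows.map (pvKf wd)) := by
    rw [PySem.Dict.keys_foldl_modify_key rows (pvKf wd) [] (fun _ x l => l ++ [x])]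
    simp [PySem.Set.update_nil_left]
  -- A side
  unfold data_by_dest
  rw [A_fold_eq rows wd h PySem.Dict.empty]
  show (rows.foldl (fun d ent => d.modify (pvKf wd ent) [] (fun l => l ++ [ent])) PySem.Dict.empty).items
      = data_by_dest_alt rows wd
  rw [PySem.Dict.items_eq_map_keys _ hnd [], hkeys]
  -- B side
  unfold data_by_dest_alt
  rw [B_keys_eq rows wd h]
  show _ = (((rows.map (pvKf wd)).foldl (fun acc k => if acc.contains k then acc else acc ++ [k]) []).map
      (fun k => (k, (((rows.map (pvKf wd)).zip rows).filter (fun p => p.1 == k)).map (fun p => p.2))))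
  rw [B_order_eq]
  apply List.map_congr_left
  intro k hk
  refine congrArg (fun v => (k, v)) ?_
  rw [hfold, PySem.Dict.getD_foldl_modify_append]
  have hzip : (rows.map (pvKf wd)).zip rows = rows.map (fun e => (pvKf wd e, e)) := by
    simpa using List.zip_map' (f := pvKf wd) (g := id) (l := rows)
  rw [hzip]
  simp [PySem.Dict.getD_empty, List.filter_map]

-- ===== VERDICT (by name: the statement is the Claim_ definition above) =====
theorem data_by_dest_spec : Claim_equal_data_by_dest := by
  intro rows wd _ hp
  exact data_by_dest_spec' rows wd hp
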